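-- pv_equiv track=rewrite | github.com/joojinhyeok/coding_test | 프로그래머스/1/17681. ［1차］ 비밀지도/［1차］ 비밀지도.py | solution
-- ===== SOURCE A (Python) =====
-- def solution(n, arr1, arr2):
--     answer = []
--     for i in range(n):
--         # 1. 두 숫자를 비트 OR 로 합침
--         # or 연산은 bin() 사용 안해도 자동 계산
--         combined = arr1[i] | arr2[i]
--
--         # 2. 이진수로 변환 후 앞의 '0b' 제거
--         # 3. zfill(n)으로 자릿수(n)만큼 0 채우기
--         binary_str = bin(combined)[2:].zfill(n)
--
--         # 4. 1은 벽(#), 0은 공백( )으로 바꾸기 (문제 요구사항)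
--         row = binary_str.replace('1', '#').replace('0', ' ')
--         answer.append(row)
--
--     return answer
-- ===== SOURCE B (Python) =====
-- def solution(n, arr1, arr2):
--     answer = []
--     for a, b in zip(arr1[:n], arr2[:n]):
--         c = a | b
--         ch = []
--         while True:                # extract digits low-to-high
--             ch.append('#' if c & 1 else ' ')
--             c >>= 1
--             if c == 0:
--                 break
--         while len(ch) < n:         # pad (high side) with blanks
--             ch.append(' ')
--         answer.append(''.join(reversed(ch)))
--     return answer
-- ===== Notes on version B (the rewrite author's own statement) =====
-- stated objective: alternative
-- what changed: B iterates over zip(arr1[:n], arr2[:n]) and builds each row back-to-front by a do-while divmod loop extracting the low bit of the OR, pads the high side with blanks and reverses, instead of A's index loop with the bin()/[2:]/zfill()/replace()/replace() string-formatting pipeline.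
-- outside the precondition, e.g. on solution(2, [-1, 2], [0, 1]): A returns ['b#', '##'], B does not finish within the time limit; on solution(-1, [0, 0], [0, 0]): A returns [], B returns [' ']
import Mathlib
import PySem

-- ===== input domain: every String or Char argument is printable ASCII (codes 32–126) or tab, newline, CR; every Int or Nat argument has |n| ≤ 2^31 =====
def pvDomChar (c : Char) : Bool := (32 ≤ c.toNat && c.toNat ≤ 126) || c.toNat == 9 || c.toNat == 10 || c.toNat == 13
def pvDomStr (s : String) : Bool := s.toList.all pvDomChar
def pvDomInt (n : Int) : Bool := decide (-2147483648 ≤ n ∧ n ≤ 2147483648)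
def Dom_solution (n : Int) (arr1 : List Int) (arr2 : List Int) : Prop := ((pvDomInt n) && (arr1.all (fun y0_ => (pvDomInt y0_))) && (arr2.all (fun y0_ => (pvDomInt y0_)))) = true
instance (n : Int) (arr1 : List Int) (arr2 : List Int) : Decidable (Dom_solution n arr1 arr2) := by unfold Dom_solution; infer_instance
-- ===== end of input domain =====

-- B iterates over zip(arr1[:n], arr2[:n]) and builds each row back-to-front by a do-while
-- low-bit-extraction loop, pads with blanks and reverses — instead of A's index loop with
-- the bin()/[2:]/zfill()/replace()/replace() string pipeline (objective: alternative).

-- ===== PORT A =====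
-- for i in range(n): combined = arr1[i] | arr2[i];
--   row = bin(combined)[2:].zfill(n).replace('1','#').replace('0',' '); answer.append(row)
-- (arr1[i]/arr2[i] are valid indices under Pre_, so the total pyGetD form is exact there)
def solution (n : Int) (arr1 : List Int) (arr2 : List Int) : List String :=
  (PySem.List.pyRange 0 n 1).foldl
    (fun answer i =>
      let combined := PySem.Int.bor (PySem.List.pyGetD arr1 i 0) (PySem.List.pyGetD arr2 i 0)
      -- bin(combined)[2:] : PySem.Int.toBinChars0b = bin(), then the [2:] slice
      let binaryStr := PySem.Chars.zfill (PySem.List.slice (PySem.Int.toBinChars0b combined) (some 2) none) n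
      let row := PySem.Chars.replace (PySem.Chars.replace binaryStr ['1'] ['#']) ['0'] [' ']
      answer ++ [String.ofList row]) []

-- ===== PORT B =====
-- the do-while 'ch.append('#' if c & 1 else ' '); c >>= 1; if c == 0: break' loop;
-- combined is nonnegative under Pre_, so the Nat recursion is exact there
def bitsLow (c : Nat) : List Char :=
  if h : c / 2 = 0 then [if c % 2 = 1 then '#' else ' ']
  else (if c % 2 = 1 then '#' else ' ') :: bitsLow (c / 2)
termination_by c
decreasing_by omega

-- 'while len(ch) < n: ch.append(' ')' then ''.join(reversed(ch))
def renderRowAlt (n : Int) (c : Int) : String :=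
  String.ofList ((bitsLow c.toNat ++ List.replicate (n.toNat - (bitsLow c.toNat).length) ' ').reverse)

-- for a, b in zip(arr1[:n], arr2[:n]): … answer.append(render of a | b)
def solution_alt (n : Int) (arr1 : List Int) (arr2 : List Int) : List String :=
  ((PySem.List.slice arr1 none (some n)).zip (PySem.List.slice arr2 none (some n))).map
    (fun p => renderRowAlt n (PySem.Int.bor p.1 p.2))

-- ===== PRECONDITION & SPEC =====
-- Pre_ restricts to the problem's natural domain: 0 ≤ n ≤ both lengths (A raises IndexError
-- beyond the lengths; for 0 < n > lengths' negatives B's slice-zip can still yield rows) with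
-- the first n entries nonnegative — a secret-map row is a nonnegative bit pattern and no
-- rendering of a negative entry is specified (A's bin() slice leaves stray 'b'/'-' characters
-- there, B's digit loop does not terminate); it also admits the degenerate negative-n inputs whose slices
-- are empty, where both programs return [].
def Pre_solution (n : Int) (arr1 : List Int) (arr2 : List Int) : Prop :=
  (0 ≤ n ∧ n ≤ (arr1.length : Int) ∧ n ≤ (arr2.length : Int) ∧
    (∀ k < n.toNat, 0 ≤ arr1.getD k 0) ∧ (∀ k < n.toNat, 0 ≤ arr2.getD k 0)) ∨
  ((arr1.length : Int) ≤ -n ∨ (arr2.length : Int) ≤ -n)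
instance (n : Int) (arr1 : List Int) (arr2 : List Int) : Decidable (Pre_solution n arr1 arr2) := by
  unfold Pre_solution; infer_instance

def pvWitness_solution : Int × List Int × List Int := (2, [9, 20], [30, 1])

def Spec_solution (n : Int) (arr1 : List Int) (arr2 : List Int) (out : List String) : Prop := out = solution_alt n arr1 arr2
instance (n : Int) (arr1 : List Int) (arr2 : List Int) (out : List String) : Decidable (Spec_solution n arr1 arr2 out) := by unfold Spec_solution; infer_instance

-- ===== CLAIM (what is proved, stated in full; the proofs are below) =====
def Claim_equal_solution : Prop := ∀ (n : Int) (arr1 : List Int) (arr2 : List Int), Dom_solution n arr1 arr2 → Pre_solution n arr1 arr2 → Spec_solution n arr1 arr2 (solution n arr1 arr2)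

-- ===== LEMMAS AND PROOFS =====

def replCh (c : Char) : Char := if c = '1' then '#' else ' '

def bitChars (m : Nat) : List Char :=
  (List.range (PySem.Int.bitLength (m : Int))).reverse.map (fun j => if m.testBit j then '1' else '0')

theorem bitChars_step (m : Nat) (h : 0 < m) :
    bitChars m = bitChars (m / 2) ++ [(m % 2).digitChar] := by
  unfold bitChars
  rw [PySem.Int.bitLength_natCast h, List.range_succ_eq_map, List.reverse_cons, List.map_append,
    List.map_reverse, List.map_map, ← List.map_reverse]
  congr 1
  · apply List.map_congr_left
    intro j _
    simp [Function.comp, Nat.testBit_add_one]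
  · rcases Nat.mod_two_eq_zero_or_one m with h2 | h2 <;>
      simp [Nat.testBit_zero, h2, Nat.digitChar]

theorem toDigitsCore_two (fuel : Nat) : ∀ (n : Nat) (ds : List Char), n < fuel →
    Nat.toDigitsCore 2 fuel n ds = (if n = 0 then ['0'] else bitChars n) ++ ds := by
  induction fuel with
  | zero => intro n ds h; omega
  | succ fuel ih =>
    intro n ds h
    rw [Nat.toDigitsCore]
    by_cases h0 : n / 2 = 0
    · have hn2 : n < 2 := by omega
      simp only [h0]
      interval_cases n
      · simp [Nat.digitChar]
      · have : bitChars 1 = ['1'] := by decide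
        simp [this, Nat.digitChar]
    · rw [if_neg h0, ih (n / 2) _ (by omega), if_neg h0]
      have hn : n ≠ 0 := by omega
      rw [if_neg hn, bitChars_step n (by omega)]
      simp

theorem toDigits_two (m : Nat) : Nat.toDigits 2 m = (if m = 0 then ['0'] else bitChars m) := by
  rw [Nat.toDigits, toDigitsCore_two (m + 1) m [] (by omega), List.append_nil]

theorem replace_go_single (o w : Char) : ∀ (l acc : List Char),
    PySem.Chars.replace.go [o] [w] l.length l acc = acc.reverse ++ l.map (fun c => if c = o then w else c) := by
  intro l
  induction l with
  | nil => intro acc; simp [PySem.Chars.replace.go]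
  | cons c t ih =>
    intro acc
    rw [List.length_cons, PySem.Chars.replace.go]
    by_cases hc : c = o
    · have hp : List.isPrefixOf [o] (c :: t) = true := by
        simp [List.isPrefixOf, hc]
      rw [if_pos hp]
      simp only [List.length_singleton, List.drop_one, List.tail_cons, List.reverse_singleton,
        List.singleton_append]
      rw [ih (w :: acc)]
      simp [hc]
    · have hp : List.isPrefixOf [o] (c :: t) = false := by
        simp [List.isPrefixOf]; exact fun h => absurd h.symm hc
      rw [if_neg (by simp [hp])]
      rw [ih (c :: acc)]
      simp [hc]

theorem replace_single (s : List Char) (o w : Char) :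
    PySem.Chars.replace s [o] [w] = s.map (fun c => if c = o then w else c) := by
  have h := replace_go_single o w s []
  simpa [PySem.Chars.replace] using h

theorem zfill_digits (ds : List Char) (w : Int) (hd : ∀ c ∈ ds, c = '0' ∨ c = '1') (hne : ds ≠ []) :
    PySem.Chars.zfill ds w = List.replicate (w.toNat - ds.length) '0' ++ ds := by
  unfold PySem.Chars.zfill
  by_cases hw : w ≤ (ds.length : Int)
  · rw [if_pos hw]
    have : w.toNat - ds.length = 0 := by omega
    simp [this]
  · rw [if_neg hw]
    cases ds with
    | nil => exact absurd rfl hne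
    | cons c rest =>
      have := hd c (by simp)
      rcases this with h | h <;> simp [h]

theorem bitChars_mem (m : Nat) : ∀ c ∈ bitChars m, c = '0' ∨ c = '1' := by
  intro c hc
  simp only [bitChars, List.mem_map, List.mem_reverse, List.mem_range] at hc
  obtain ⟨j, _, hj⟩ := hc
  by_cases h : m.testBit j
  · right; rw [← hj, if_pos h]
  · left; rw [← hj, if_neg h]

theorem bitsLow_rev : ∀ m : Nat, 0 < m → (bitsLow m).reverse = (bitChars m).map replCh := by
  intro m
  induction m using Nat.strong_induction_on with
  | _ m ih =>
    intro hm
    rw [bitsLow]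
    by_cases h2 : m / 2 = 0
    · have hm1 : m = 1 := by omega
      subst hm1
      rw [dif_pos h2]
      decide
    · rw [dif_neg h2, List.reverse_cons, ih (m / 2) (by omega) (by omega),
        bitChars_step m hm, List.map_append]
      congr 1
      rcases Nat.mod_two_eq_zero_or_one m with h | h <;>
        simp [h, replCh, Nat.digitChar]

theorem row_eq (n : Int) (m : Nat) :
    String.ofList (PySem.Chars.replace (PySem.Chars.replace
        (PySem.Chars.zfill (PySem.List.slice (PySem.Int.toBinChars0b (m : Int)) (some 2) none) n)
        ['1'] ['#']) ['0'] [' '])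
      = renderRowAlt n (m : Int) := by
  have h0b : PySem.Int.toBinChars0b (m:Int) = '0'::'b'::Nat.toDigits 2 m := by
    simp [PySem.Int.toBinChars0b]
  have hsl : PySem.List.slice ('0'::'b'::Nat.toDigits 2 m) (some (2:Int)) none = Nat.toDigits 2 m := by
    simp [PySem.List.slice_from]
  rw [h0b, hsl, toDigits_two]
  -- the digits, and the agreement of B's reversed low-bit list with their replacement
  by_cases hm0 : m = 0
  · -- combined = 0: A renders max(n,1) blanks, B pads the empty digit list to n blanks
    subst hm0
    rw [if_pos rfl]
    have hz : PySem.Chars.zfill ['0'] n = List.replicate (n.toNat - 1) '0' ++ ['0'] := by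
      have h := zfill_digits ['0'] n (by intro c hc; simp at hc; left; exact hc) (by simp)
      simpa using h
    rw [hz, replace_single, replace_single, List.map_append, List.map_append,
        List.map_replicate, List.map_replicate]
    rw [show (if ('0':Char) = '1' then '#' else '0') = '0' from by decide]
    rw [show (if ('0':Char) = '0' then ' ' else '0') = ' ' from by decide]
    simp only [List.map_cons, List.map_nil]
    rw [show (if ('0':Char) = '1' then '#' else '0') = '0' from by decide]
    rw [show (if ('0':Char) = '0' then ' ' else '0') = ' ' from by decide]
    unfold renderRowAlt
    rw [Int.toNat_natCast, show bitsLow 0 = [' '] from by rw [bitsLow, dif_pos rfl]; decide]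
    refine congrArg String.ofList ?_
    simp
  have hrev : (bitsLow m).reverse = (if m = 0 then ['0'] else bitChars m).map replCh := by
    rw [if_neg hm0]; exact bitsLow_rev m (Nat.pos_of_ne_zero hm0)
  have hdig : ∀ c ∈ (if m = 0 then ['0'] else bitChars m), c = '0' ∨ c = '1' := by
    rw [if_neg hm0]; exact bitChars_mem m
  have hne : (if m = 0 then ['0'] else bitChars m) ≠ [] := by
    rw [if_neg hm0]
    intro hnil
    have := PySem.Int.bitLength_natCast (Nat.pos_of_ne_zero hm0)
    have hlen : (bitChars m).length = PySem.Int.bitLength (m:Int) := by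
      simp [bitChars]
    rw [hnil] at hlen
    simp at hlen
    omega
  set ds := (if m = 0 then ['0'] else bitChars m) with hds
  have hlen : (bitsLow m).length = ds.length := by
    have := congrArg List.length hrev
    simpa using this
  rw [zfill_digits ds n hdig hne, replace_single, replace_single,
      List.map_append, List.map_append, List.map_replicate, List.map_replicate]
  rw [show (if ('0':Char) = '1' then '#' else '0') = '0' from by decide]
  rw [show (if ('0':Char) = '0' then ' ' else '0') = ' ' from by decide]
  unfold renderRowAlt
  rw [Int.toNat_natCast, List.reverse_append, List.reverse_replicate]
  rw [hrev, hlen]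
  congr 1
  rw [List.map_map]
  congr 1
  apply List.map_congr_left
  intro c hc
  rcases hdig c hc with h | h <;> simp [h, replCh]

theorem solution_eq_alt (n : Int) (arr1 arr2 : List Int) (hpre : Pre_solution n arr1 arr2) :
    solution n arr1 arr2 = solution_alt n arr1 arr2 := by
  rcases hpre with ⟨hn0, hl1, hl2, hp1, hp2⟩ | hdeg
  case inr =>
    -- degenerate negative n with an empty slice: both sides are []
    have hn : n ≤ 0 := by rcases hdeg with h | h <;> omega
    unfold solution solution_alt
    rw [PySem.List.pyRange_one_eq_nil hn, List.foldl_nil]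
    by_cases hz : n = 0
    · subst hz
      rw [PySem.List.slice_to arr1 le_rfl]
      simp
    · have hk : 0 < (-n).toNat := by omega
      have hne : n = -(((-n).toNat : Nat) : Int) := by omega
      rw [hne, PySem.List.slice_to_neg_natCast arr1 ((-n).toNat) hk, PySem.List.slice_to_neg_natCast arr2 ((-n).toNat) hk]
      rcases hdeg with h | h
      · have h1 : arr1.length - (-n).toNat = 0 := by omega
        rw [h1]
        simp
      · have h2 : arr2.length - (-n).toNat = 0 := by omega
        rw [h2]
        simp
  unfold solution solution_alt
  refine Eq.trans (PySem.List.foldl_append_singleton_eq_map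
    (fun i : Int => String.ofList (PySem.Chars.replace (PySem.Chars.replace
      (PySem.Chars.zfill (PySem.List.slice (PySem.Int.toBinChars0b
        (PySem.Int.bor (PySem.List.pyGetD arr1 i 0) (PySem.List.pyGetD arr2 i 0))) (some 2) none) n)
      ['1'] ['#']) ['0'] [' '])) (PySem.List.pyRange 0 n 1) []) ?_
  rw [List.nil_append, PySem.List.slice_to arr1 hn0, PySem.List.slice_to arr2 hn0]
  have hL1 : n.toNat ≤ arr1.length := by omega
  have hL2 : n.toNat ≤ arr2.length := by omega
  apply List.ext_getElem
  · simp [PySem.List.length_pyRange_one]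
    omega
  · intro k hk1 hk2
    have hkn : k < n.toNat := by
      simpa [PySem.List.length_pyRange_one] using hk1
    have hk1' : k < arr1.length := by omega
    have hk2' : k < arr2.length := by omega
    rw [List.getElem_map, List.getElem_map, PySem.List.getElem_pyRange_one, List.getElem_zip,
        List.getElem_take, List.getElem_take]
    have hget1 : PySem.List.pyGetD arr1 (0 + (k : Int)) 0 = arr1[k] := by
      rw [zero_add, PySem.List.pyGetD_natCast, List.getD_eq_getElem?_getD,
        List.getElem?_eq_getElem hk1']
      rfl
    have hget2 : PySem.List.pyGetD arr2 (0 + (k : Int)) 0 = arr2[k] := by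
      rw [zero_add, PySem.List.pyGetD_natCast, List.getD_eq_getElem?_getD,
        List.getElem?_eq_getElem hk2']
      rfl
    rw [hget1, hget2]
    have ha : 0 ≤ arr1[k] := by
      have := hp1 k hkn
      rwa [List.getD_eq_getElem?_getD, List.getElem?_eq_getElem hk1'] at this
    have hb : 0 ≤ arr2[k] := by
      have := hp2 k hkn
      rwa [List.getD_eq_getElem?_getD, List.getElem?_eq_getElem hk2'] at this
    rw [PySem.Int.bor_of_nonneg ha hb]
    exact row_eq n _

-- ===== VERDICT (by name: the statement is the Claim_ definition above) =====
theorem solution_spec : Claim_equal_solution := by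
  intro n arr1 arr2 _ hpre
  unfold Spec_solution
  exact solution_eq_alt n arr1 arr2 hpre
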